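-- pv_equiv track=rewrite | github.com/nlpatunt/sgrades | app/services/dataset_loader.py | _detect_prompt_column
-- ===== SOURCE A (Python) =====
-- def _detect_prompt_column(columns: list, sample: dict) -> str:
--     """Auto-detect prompt column"""
--
--     prompt_keywords = [
--         "question_text",
--         "prompt_name",
--         "prompt",
--         "question",
--         "task",
--         "essay_set",
--         "set",
--         "prompt_text",
--         "writing_prompt",
--         "assignment",
--     ]
--
--     for keyword in prompt_keywords:
--         for col in columns:
--             if keyword.lower() in col.lower():
--                 return col
--
--     # Look for text columns that aren't the essay
--     for col in columns:
--         if isinstance(sample[col], str) and 10 <= len(sample[col]) <= 200: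
--             return col
--
--     return "prompt"  # Default fallback
-- ===== SOURCE B (Python) =====
-- def _detect_prompt_column(columns: list, sample: dict) -> str:
--     """Auto-detect prompt column"""
--
--     prompt_keywords = ("question_text", "prompt_name", "prompt", "question", "task",
--                        "essay_set", "set", "prompt_text", "writing_prompt", "assignment")
--     sentinel = len(prompt_keywords)
--
--     def rank(col):
--         low = col.lower()
--         return next((i for i, kw in enumerate(prompt_keywords) if kw in low), sentinel)
--
--     # single pass: keep the column with the smallest (keyword priority, position) pair
--     best_rank, best_col = sentinel, None
--     for col in columns:
--         r = rank(col)
--         if r < best_rank: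
--             best_rank, best_col = r, col
--     if best_rank < sentinel:
--         return best_col
--
--     # no keyword hit: first column whose sample value is a 10..200-char string
--     for col in columns:
--         value = sample[col]
--         if isinstance(value, str) and 10 <= len(value) <= 200:
--             return col
--     return "prompt"
-- ===== Notes on version B (the rewrite author's own statement) =====
-- stated objective: alternative
-- what changed: Replaces the keyword-outer/column-inner nested early-return scan by a single pass over columns that ranks each column with the index of the first keyword it contains (sentinel if none) and keeps the first column with the strictly smallest rank; the unchanged fallback runs only when every rank is the sentinel.
import Mathlib
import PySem

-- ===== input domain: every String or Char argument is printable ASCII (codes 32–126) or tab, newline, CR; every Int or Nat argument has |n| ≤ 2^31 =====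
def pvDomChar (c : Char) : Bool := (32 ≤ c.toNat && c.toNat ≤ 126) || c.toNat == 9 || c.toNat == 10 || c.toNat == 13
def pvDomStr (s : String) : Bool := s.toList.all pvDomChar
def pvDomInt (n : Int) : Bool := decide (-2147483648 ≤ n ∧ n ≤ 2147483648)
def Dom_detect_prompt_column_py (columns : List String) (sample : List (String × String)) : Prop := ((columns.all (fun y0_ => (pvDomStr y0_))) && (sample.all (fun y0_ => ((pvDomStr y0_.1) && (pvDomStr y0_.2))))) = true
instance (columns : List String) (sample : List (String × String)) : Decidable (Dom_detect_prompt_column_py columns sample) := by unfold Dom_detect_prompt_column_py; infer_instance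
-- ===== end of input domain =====

-- B replaces A's keyword-outer/column-inner nested early-return scan by a single rank-then-select
-- pass over the columns (same cost; objective: alternative decomposition).


-- ===== PORT A =====

def pvKeywords : List String :=
  ["question_text", "prompt_name", "prompt", "question", "task",
   "essay_set", "set", "prompt_text", "writing_prompt", "assignment"]

-- `keyword.lower() in col.lower()`
def pvMatchA (kw col : String) : Bool := PySem.Str.isIn (PySem.Str.lower kw) (PySem.Str.lower col)

-- fallback loop (identical source text in A and in B):
-- `for col in columns: if isinstance(sample[col], str) and 10 <= len(sample[col]) <= 200: return col`
-- then `return "prompt"`.  `sample[col]` on a missing key is a KeyError (excluded by Pre_);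
-- the port returns "prompt" on that unreached branch.  `isinstance(..., str)` is always true
-- under the type convention (values of `sample` are str) and is dropped.
def pvFallback (sample : List (String × String)) : List String → String
  | [] => "prompt"
  | c :: rest =>
    match sample.lookup c with
    | none => "prompt"  -- Python: KeyError, outside Pre_
    | some v => if 10 ≤ PySem.Str.len v ∧ PySem.Str.len v ≤ 200 then c else pvFallback sample rest

-- inner loop `for col in columns: if keyword.lower() in col.lower(): return col`
def pvInnerA (kw : String) : List String → Option String
  | [] => none
  | c :: rest => if pvMatchA kw c then some c else pvInnerA kw rest

-- outer loop `for keyword in prompt_keywords:`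
def pvOuterA : List String → List String → Option String
  | _, [] => none
  | cols, kw :: rest =>
    match pvInnerA kw cols with
    | some c => some c
    | none => pvOuterA cols rest

def detect_prompt_column_py (columns : List String) (sample : List (String × String)) : String :=
  match pvOuterA columns pvKeywords with
  | some c => c
  | none => pvFallback sample columns

-- ===== PORT B =====

-- rank(col) = next((i for i, kw in enumerate(prompt_keywords) if kw in low), sentinel)
def pvRankAux (low : String) (i : Nat) : List String → Nat
  | [] => i
  | kw :: rest => if PySem.Str.isIn kw low then i else pvRankAux low (i + 1) rest

def pvRankB (col : String) : Nat := pvRankAux (PySem.Str.lower col) 0 pvKeywords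

-- the single pass keeping (best_rank, best_col), strictly-less so the first minimum wins
def pvScanB : Nat × Option String → List String → Nat × Option String
  | acc, [] => acc
  | acc, c :: rest =>
    let r := pvRankB c
    pvScanB (if r < acc.1 then (r, some c) else acc) rest

def detect_prompt_column_py_alt (columns : List String) (sample : List (String × String)) : String :=
  let best := pvScanB (pvKeywords.length, none) columns
  if best.1 < pvKeywords.length then
    best.2.getD "prompt"  -- best.2 is always `some _` here; getD only for typing (best_col is not None)
  else
    pvFallback sample columns

-- ===== PRECONDITION & SPEC =====

def pvGoodVal (o : Option String) : Bool :=
  match o with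
  | some v => decide (10 ≤ PySem.Str.len v ∧ PySem.Str.len v ≤ 200)
  | none => false

-- Pre_ excludes exactly the inputs where the Python raises KeyError: no keyword matches any
-- column and the fallback scan reaches a column missing from `sample` before any column whose
-- value has length 10..200 (both A and B raise there).
def Pre_detect_prompt_column_py (columns : List String) (sample : List (String × String)) : Prop :=
  (∃ kw ∈ pvKeywords, ∃ col ∈ columns, pvMatchA kw col = true) ∨
  (∀ i ∈ List.range columns.length, (sample.lookup (columns.getD i "")).isNone = true →
      ∃ j ∈ List.range i, pvGoodVal (sample.lookup (columns.getD j "")) = true)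

instance (columns : List String) (sample : List (String × String)) : Decidable (Pre_detect_prompt_column_py columns sample) := by unfold Pre_detect_prompt_column_py; infer_instance

def pvWitness_detect_prompt_column_py : List String × (List (String × String)) := (["prompt"], [])

def Spec_detect_prompt_column_py (columns : List String) (sample : List (String × String)) (out : String) : Prop := out = detect_prompt_column_py_alt columns sample
instance (columns : List String) (sample : List (String × String)) (out : String) : Decidable (Spec_detect_prompt_column_py columns sample out) := by unfold Spec_detect_prompt_column_py; infer_instance

-- ===== CLAIM (what is proved, stated in full; the proofs are below) =====
def Claim_equal_detect_prompt_column_py : Prop := ∀ (columns : List String) (sample : List (String × String)), Dom_detect_prompt_column_py columns sample → Pre_detect_prompt_column_py columns sample → Spec_detect_prompt_column_py columns sample (detect_prompt_column_py columns sample)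

-- ===== LEMMAS AND PROOFS =====

-- generic rank of a column w.r.t. a keyword list (B's predicate: the keywords are lowercase)
def pvGRank : List String → String → Nat
  | [], _ => 0
  | kw :: rest, c => if PySem.Str.isIn kw (PySem.Str.lower c) then 0 else pvGRank rest c + 1

-- generic scan, parametrised by the keyword list
def pvGScan (kws : List String) : Nat × Option String → List String → Nat × Option String
  | acc, [] => acc
  | acc, c :: rest =>
    let r := pvGRank kws c
    pvGScan kws (if r < acc.1 then (r, some c) else acc) rest

theorem pvRankAux_add (c : String) : ∀ (kws : List String) (i : Nat),
    pvRankAux (PySem.Str.lower c) i kws = i + pvGRank kws c := by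
  intro kws
  induction kws with
  | nil => intro i; simp [pvRankAux, pvGRank]
  | cons kw rest ih =>
    intro i
    simp only [pvRankAux, pvGRank]
    by_cases h : PySem.Str.isIn kw (PySem.Str.lower c) = true
    · rw [if_pos h, if_pos h]; omega
    · rw [if_neg h, if_neg h, ih (i + 1)]
      omega

theorem pvRankB_eq (c : String) : pvRankB c = pvGRank pvKeywords c := by
  simp [pvRankB, pvRankAux_add c pvKeywords 0]

theorem pvScanB_eq : ∀ (cols : List String) (acc : Nat × Option String),
    pvScanB acc cols = pvGScan pvKeywords acc cols := by
  intro cols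
  induction cols with
  | nil => intro acc; rfl
  | cons c rest ih => intro acc; simp only [pvScanB, pvGScan, pvRankB_eq]; exact ih _

-- the empty keyword list: every rank is 0, never < 0, so the scan keeps (0, none)
theorem pvGScan_nil : ∀ (cols : List String), pvGScan [] (0, none) cols = (0, none) := by
  intro cols
  induction cols with
  | nil => rfl
  | cons c rest ih => simpa [pvGScan, pvGRank] using ih

-- once rank 0 is reached the accumulator never changes
theorem pvGScan_absorb (kws : List String) (o : Option String) :
    ∀ (cols : List String), pvGScan kws (0, o) cols = (0, o) := by
  intro cols
  induction cols with
  | nil => rfl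
  | cons c rest ih => simpa [pvGScan] using ih

-- if the head keyword matches some column (first such column c), the scan ends at (0, some c)
theorem pvGScan_first (kw : String) (rest : List String) (hkw : PySem.Str.lower kw = kw)
    (c : String) : ∀ (cols : List String) (a : Nat) (o : Option String), 1 ≤ a →
    pvInnerA kw cols = some c → pvGScan (kw :: rest) (a, o) cols = (0, some c) := by
  intro cols
  induction cols with
  | nil => intro a o _ h; simp [pvInnerA] at h
  | cons c0 cs ih =>
    intro a o ha h
    cases hm : PySem.Str.isIn kw (PySem.Str.lower c0) with
    | true =>
      have hma : pvMatchA kw c0 = true := by simp only [pvMatchA, hkw]; exact hm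
      have hmc : PySem.Chars.isIn kw.toList (PySem.Chars.lower c0.toList) = true := by
        simpa using hm
      have hg : pvGRank (kw :: rest) c0 = 0 := by simp [pvGRank, hmc]
      obtain rfl : c0 = c := by simpa [pvInnerA, hma] using h
      simp only [pvGScan, hg]
      rw [if_pos (show (0 : Nat) < (a, o).1 by simpa using Nat.lt_of_lt_of_le Nat.zero_lt_one ha)]
      exact pvGScan_absorb _ _ cs
    | false =>
      have hma : pvMatchA kw c0 = false := by simp only [pvMatchA, hkw]; exact hm
      have h' : pvInnerA kw cs = some c := by simpa [pvInnerA, hma] using h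
      have hmc : PySem.Chars.isIn kw.toList (PySem.Chars.lower c0.toList) = false := by
        simpa using hm
      have hg : pvGRank (kw :: rest) c0 = pvGRank rest c0 + 1 := by simp [pvGRank, hmc]
      simp only [pvGScan, hg]
      by_cases hlt : pvGRank rest c0 + 1 < (a, o).1
      · rw [if_pos hlt]; exact ih _ _ (by omega) h'
      · rw [if_neg hlt]; exact ih _ _ ha h'

-- if the head keyword matches no column, the scan is the scan over the tail with ranks shifted by 1
theorem pvGScan_shift (kw : String) (rest : List String) (hkw : PySem.Str.lower kw = kw) :
    ∀ (cols : List String) (a : Nat) (o : Option String), pvInnerA kw cols = none →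
    pvGScan (kw :: rest) (a + 1, o) cols =
      ((pvGScan rest (a, o) cols).1 + 1, (pvGScan rest (a, o) cols).2) := by
  intro cols
  induction cols with
  | nil => intro a o _; rfl
  | cons c0 cs ih =>
    intro a o h
    cases hm : PySem.Str.isIn kw (PySem.Str.lower c0) with
    | true =>
      have hma : pvMatchA kw c0 = true := by simp only [pvMatchA, hkw]; exact hm
      simp [pvInnerA, hma] at h
    | false =>
      have hma : pvMatchA kw c0 = false := by simp only [pvMatchA, hkw]; exact hm
      have h' : pvInnerA kw cs = none := by simpa [pvInnerA, hma] using h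
      have hmc : PySem.Chars.isIn kw.toList (PySem.Chars.lower c0.toList) = false := by
        simpa using hm
      have hg : pvGRank (kw :: rest) c0 = pvGRank rest c0 + 1 := by simp [pvGRank, hmc]
      simp only [pvGScan, hg]
      by_cases hlt : pvGRank rest c0 < a
      · rw [if_pos (show pvGRank rest c0 + 1 < (a + 1, o).1 by simpa using Nat.succ_lt_succ hlt),
            if_pos (show pvGRank rest c0 < (a, o).1 from hlt)]
        exact ih _ _ h'
      · rw [if_neg (show ¬ pvGRank rest c0 + 1 < (a + 1, o).1 by simpa using fun hq => hlt (Nat.lt_of_succ_lt_succ hq)),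
            if_neg (show ¬ pvGRank rest c0 < (a, o).1 from hlt)]
        exact ih _ _ h'

-- main correspondence: the scan's selected column is exactly A's nested-loop result,
-- and the final best rank is below the sentinel iff A's nested loop found a column
theorem pvMain : ∀ (kws : List String), (∀ kw ∈ kws, PySem.Str.lower kw = kw) →
    ∀ (cols : List String), ∃ r : Nat,
      pvGScan kws (kws.length, none) cols = (r, pvOuterA cols kws) ∧
      (r < kws.length ↔ (pvOuterA cols kws).isSome = true) := by
  intro kws
  induction kws with
  | nil =>
    intro _ cols
    exact ⟨0, by simp [pvGScan_nil, pvOuterA]⟩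
  | cons kw rest ih =>
    intro hlow cols
    have hkw : PySem.Str.lower kw = kw := hlow kw (List.mem_cons_self ..)
    cases h : pvInnerA kw cols with
    | some c =>
      refine ⟨0, ?_, ?_⟩
      · have := pvGScan_first kw rest hkw c cols (rest.length + 1) none (by omega) h
        simpa [pvOuterA, h] using this
      · simp [pvOuterA, h]
    | none =>
      obtain ⟨r, hsc, hiff⟩ := ih (fun k hk => hlow k (List.mem_cons_of_mem _ hk)) cols
      refine ⟨r + 1, ?_, ?_⟩
      · have := pvGScan_shift kw rest hkw cols rest.length none h
        simp only [List.length_cons] at *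
        rw [this, hsc]
        simp [pvOuterA, h]
      · simp only [pvOuterA, h, List.length_cons]
        constructor
        · intro hr; exact hiff.mp (by omega)
        · intro hs; have := hiff.mpr hs; omega

theorem pvLowKeywords : ∀ kw ∈ pvKeywords, PySem.Str.lower kw = kw := by decide

-- ===== VERDICT (by name: the statement is the Claim_ definition above) =====
theorem detect_prompt_column_py_spec : Claim_equal_detect_prompt_column_py := by
  intro columns sample _hdom _hpre
  unfold Spec_detect_prompt_column_py detect_prompt_column_py detect_prompt_column_py_alt
  obtain ⟨r, hsc, hiff⟩ := pvMain pvKeywords pvLowKeywords columns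
  rw [pvScanB_eq, hsc]
  cases h : pvOuterA columns pvKeywords with
  | some c =>
    have hr : r < pvKeywords.length := hiff.mpr (by simp [h])
    simp [hr]
  | none =>
    have hr : ¬ r < pvKeywords.length := fun hlt => by simp [h] at hiff; omega
    simp [hr]
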